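-- pv_equiv track=rewrite | github.com/Len-Yoon/baekjoon-python | 프로그래머스/0/181874. A 강조하기/A 강조하기.py | solution
-- ===== SOURCE A (Python) =====
-- def solution(myString):
--     answer = ''
--
--     for i in range(len(myString)):
--         if myString[i] == 'A' or myString[i] == 'a':
--             answer += myString[i].upper()
--         else:
--             answer += myString[i].lower()
--     return answer
-- ===== SOURCE B (Python) =====
-- def solution(myString):
--     return myString.lower().replace('a', 'A')
-- ===== Notes on version B (the rewrite author's own statement) =====
-- stated objective: simpler
-- what changed: Replaced the index loop with per-character if/else and string accumulation by two whole-string operations: lower() the string, then replace('a','A').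
import Mathlib
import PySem

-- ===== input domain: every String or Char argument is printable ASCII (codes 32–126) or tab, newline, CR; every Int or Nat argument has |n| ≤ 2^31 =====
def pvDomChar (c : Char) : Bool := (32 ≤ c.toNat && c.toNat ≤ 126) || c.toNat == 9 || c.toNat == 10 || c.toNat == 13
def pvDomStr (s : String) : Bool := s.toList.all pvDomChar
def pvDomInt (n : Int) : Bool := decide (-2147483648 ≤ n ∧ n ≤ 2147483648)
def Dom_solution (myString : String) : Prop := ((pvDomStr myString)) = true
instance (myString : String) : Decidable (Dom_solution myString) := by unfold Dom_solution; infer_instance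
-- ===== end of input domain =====

-- B replaces A's index loop (per-character if/else, string accumulation) by lower() then replace('a','A'): simpler.

-- ===== PORT A =====
-- answer = ''; for each character: append its .upper() if it is 'A'/'a', else its .lower()
def solution (myString : String) : String :=
  String.ofList (myString.toList.foldl
    (fun answer c =>
      answer ++ (if c == 'A' || c == 'a' then PySem.Chars.upper [c] else PySem.Chars.lower [c]))
    [])

-- ===== PORT B =====
def solution_alt (myString : String) : String :=
  PySem.Str.replace (PySem.Str.lower myString) "a" "A"

-- ===== PRECONDITION & SPEC =====
def Spec_solution (myString : String) (out : String) : Prop := out = solution_alt myString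
instance (myString : String) (out : String) : Decidable (Spec_solution myString out) := by unfold Spec_solution; infer_instance

-- ===== CLAIM (what is proved, stated in full; the proofs are below) =====
def Claim_equal_solution : Prop := ∀ (myString : String), Dom_solution myString → Spec_solution myString (solution myString)

-- ===== LEMMAS AND PROOFS =====

-- replacing a single character 'a' by 'A' is a pointwise map (loop invariant of replace.go)
theorem replace_go_aA (fuel : Nat) (l acc : List Char) (h : l.length ≤ fuel) :
    PySem.Chars.replace.go ['a'] ['A'] fuel l acc
      = acc.reverse ++ l.map (fun c => if c == 'a' then 'A' else c) := by
  induction fuel generalizing l acc with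
  | zero =>
    have : l = [] := List.eq_nil_of_length_eq_zero (Nat.le_zero.mp h)
    subst this
    simp [PySem.Chars.replace.go]
  | succ n ih =>
    cases l with
    | nil => simp [PySem.Chars.replace.go]
    | cons c t =>
      rw [PySem.Chars.replace.go]
      by_cases hc : c = 'a'
      · subst hc
        have hpre : List.isPrefixOf ['a'] ('a' :: t) = true := by
          simp [List.isPrefixOf]
        rw [if_pos hpre, ih _ _ (by simpa using Nat.le_of_succ_le_succ h)]
        simp
      · have hpre : List.isPrefixOf ['a'] (c :: t) = false := by
          simp only [List.isPrefixOf, Bool.and_eq_false_iff, beq_eq_false_iff_ne, ne_eq]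
          exact Or.inl fun h => hc h.symm
        rw [if_neg (by simp [hpre]), ih _ _ (by simpa using Nat.le_of_succ_le_succ h)]
        simp [hc]

theorem replace_aA (l : List Char) :
    PySem.Chars.replace l ['a'] ['A'] = l.map (fun c => if c == 'a' then 'A' else c) := by
  rw [PySem.Chars.replace]
  simp only [List.isEmpty_cons, Bool.false_eq_true, if_false]
  simpa using replace_go_aA l.length l [] le_rfl

-- per-character agreement of the two programs
theorem point_eq (c : Char) :
    (if PySem.Chars.lowerChar c == 'a' then 'A' else PySem.Chars.lowerChar c)
      = (if c == 'A' || c == 'a' then PySem.Chars.upperChar c else PySem.Chars.lowerChar c) := by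
  by_cases hA : c = 'A'
  · subst hA; decide
  by_cases ha : c = 'a'
  · subst ha; decide
  have hlow : (PySem.Chars.lowerChar c == 'a') = false := by
    rw [beq_eq_false_iff_ne]
    unfold PySem.Chars.lowerChar PySem.Chars.isupper
    split_ifs with hu
    · rw [Bool.and_eq_true, decide_eq_true_eq, decide_eq_true_eq] at hu
      have h1 : 65 ≤ c.toNat := by
        have := UInt32.le_iff_toNat_le.mp (Char.le_def.mp hu.1)
        simpa using this
      have h2 : c.toNat ≤ 90 := by
        have := UInt32.le_iff_toNat_le.mp (Char.le_def.mp hu.2)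
        simpa using this
      have hv : (c.toNat + 32).isValidChar := Or.inl (by omega)
      have htn : (Char.ofNat (c.toNat + 32)).toNat = c.toNat + 32 := by
        rw [Char.toNat_ofNat, if_pos hv]
      intro h
      have h97 : (Char.ofNat (c.toNat + 32)).toNat = 97 := by rw [h]; decide
      rw [htn] at h97
      apply hA
      apply Char.ext
      apply UInt32.toNat_inj.mp
      show c.toNat = ('A' : Char).toNat
      have hc65 : c.toNat = 65 := by omega
      rw [hc65]
      decide
    · exact ha
  have hne : (c == 'A' || c == 'a') = false := by
    simp [hA, ha]
  rw [hlow, hne]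
  simp

theorem solution_eq_map (myString : String) :
    solution myString
      = String.ofList (myString.toList.map
          (fun c => if c == 'A' || c == 'a' then PySem.Chars.upperChar c else PySem.Chars.lowerChar c)) := by
  unfold solution
  congr 1
  have hfun : (fun (answer : List Char) (c : Char) =>
      answer ++ (if c == 'A' || c == 'a' then PySem.Chars.upper [c] else PySem.Chars.lower [c]))
      = (fun answer c =>
          answer ++ [if c == 'A' || c == 'a' then PySem.Chars.upperChar c else PySem.Chars.lowerChar c]) := by
    funext answer c
    by_cases h : (c == 'A' || c == 'a') = true <;>
      simp [h, PySem.Chars.upper, PySem.Chars.lower]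
  rw [hfun, PySem.List.foldl_append_singleton_eq_map]
  simp

-- ===== VERDICT (by name: the statement is the Claim_ definition above) =====
theorem solution_spec : Claim_equal_solution := by
  intro myString _
  unfold Spec_solution solution_alt
  rw [solution_eq_map]
  apply String.toList_inj.mp
  rw [PySem.Str.toList_replace, PySem.Str.toList_lower]
  have ha : ("a" : String).toList = ['a'] := by decide
  have hA : ("A" : String).toList = ['A'] := by decide
  rw [ha, hA, replace_aA, PySem.Chars.lower, List.map_map]
  simp only [String.toList_ofList]
  apply List.map_congr_left
  intro c _
  exact (point_eq c).symm
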